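-- pv_equiv track=rewrite | github.com/ck4957/practice-leetcode | _54_spiral_matrix.py | spiral_order_v2
-- ===== SOURCE A (Python) =====
-- def spiral_order_v2(matrix):
--
--     res = []
--
--     while matrix:
--         # Take the first row/list of matrix
--         res += matrix.pop(0)
--
--         # Take the last element of each remaining row
--         for row in matrix:
--             if row:
--                 res.append(row.pop())
--
--         # Take the last row in reverse order
--         if matrix:
--             res += matrix.pop()[::-1]
--         # Take the first element of each remaining row in reverse order
--         for row in matrix[::-1]:
--             if row:
--                 res.append(row.pop(0))
--     return res
-- ===== SOURCE B (Python) =====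
-- def spiral_order_v2(matrix):
--     # Half-turn peel: each pass takes the top row and the right column, then
--     # rotates the remaining rows 180 degrees and repeats; unlike A it does not
--     # mutate its argument (equivalence is about the return value).
--     res = []
--     m = matrix
--     while m:
--         res += m[0]
--         rest = m[1:]
--         res += [r[-1] for r in rest if r]
--         m = [r[:-1][::-1] for r in reversed(rest)]
--     return res
-- ===== Notes on version B (the rewrite author's own statement) =====
-- stated objective: alternative
-- what changed: Replaces A's four-phase in-place peel (pop first row, pop last of each row, pop last row reversed, pop first of each row bottom-up) by a symmetric half-turn loop that only takes the top row and right column and then rotates the remainder 180 degrees; B also does not mutate its argument, while A empties it.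
import Mathlib
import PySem

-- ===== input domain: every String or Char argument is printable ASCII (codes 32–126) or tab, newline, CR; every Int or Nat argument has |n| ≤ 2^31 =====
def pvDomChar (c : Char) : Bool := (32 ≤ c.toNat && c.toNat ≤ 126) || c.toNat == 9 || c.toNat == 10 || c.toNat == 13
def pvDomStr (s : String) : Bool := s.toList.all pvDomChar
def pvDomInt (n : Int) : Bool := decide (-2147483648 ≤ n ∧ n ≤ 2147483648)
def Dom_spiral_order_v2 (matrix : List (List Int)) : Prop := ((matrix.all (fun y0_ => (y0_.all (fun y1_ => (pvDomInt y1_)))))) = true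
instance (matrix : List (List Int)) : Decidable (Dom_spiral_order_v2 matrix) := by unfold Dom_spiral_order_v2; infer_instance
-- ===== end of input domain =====

-- B replaces A's four-phase peel by a half-turn + 180° rotation loop; A mutates
-- (empties) its argument and B does not — the equivalence proved here is about
-- the return value only.

-- ===== PORT A =====
-- Literal port of A's while-loop: each iteration pops the first row, pops the
-- last element of every remaining nonempty row (value sequence =
-- rest.filterMap getLast?, every row becomes its dropLast; dropLast [] = []
-- matches the skipped empty rows), pops the last row reversed if any rows
-- remain, and pops the first element of every remaining nonempty row bottom-up
-- (head? of each row of the reversed list; every row becomes its tail,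
-- tail [] = [] for the skipped empty rows).  The loop state (matrix) loses its
-- first row each iteration, so the row count decreases.
def spiral_order_v2 (matrix : List (List Int)) : List Int :=
  match matrix with
  | [] => []
  | first :: rest =>
    -- res += matrix.pop(0); for row in matrix: if row: res.append(row.pop())
    first ++ rest.filterMap (fun r => r.getLast?)
    -- if matrix: res += matrix.pop()[::-1]
    ++ (match (rest.map List.dropLast).getLast? with
        | some r => r.reverse
        | none => [])
    -- for row in matrix[::-1]: if row: res.append(row.pop(0))
    ++ (rest.map List.dropLast).dropLast.reverse.filterMap (fun r => r.head?)
    ++ spiral_order_v2 ((rest.map List.dropLast).dropLast.map List.tail)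
termination_by matrix.length
decreasing_by
  simp only [List.length_map, List.length_dropLast, List.length_cons, List.length_attach]
  omega

-- ===== PORT B =====
-- Literal port of Source B's while-loop, as a tail recursion on the loop state
-- (m, res): take the top row and the right column (r[-1] of each nonempty
-- row), then continue on the rest rotated 180° ([r[:-1][::-1] for r in
-- reversed(rest)]: each row trimmed of its last element and reversed, rows
-- taken bottom-up; r[:-1][::-1] = r.dropLast.reverse exactly, also for rows of
-- length ≤ 1).
def spiralAltGo (m : List (List Int)) (res : List Int) : List Int :=
  match m with
  | [] => res
  | h :: rest =>
      spiralAltGo (rest.reverse.map (fun r => r.dropLast.reverse))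
        ((res ++ h) ++ rest.filterMap (fun r => r.getLast?))
termination_by m.length
decreasing_by simp

def spiral_order_v2_alt (matrix : List (List Int)) : List Int :=
  spiralAltGo matrix []

-- ===== PRECONDITION & SPEC =====
def Spec_spiral_order_v2 (matrix : List (List Int)) (out : List Int) : Prop := out = spiral_order_v2_alt matrix
instance (matrix : List (List Int)) (out : List Int) : Decidable (Spec_spiral_order_v2 matrix out) := by unfold Spec_spiral_order_v2; infer_instance

-- ===== CLAIM (what is proved, stated in full; the proofs are below) =====
def Claim_equal_spiral_order_v2 : Prop := ∀ (matrix : List (List Int)), Dom_spiral_order_v2 matrix → Spec_spiral_order_v2 matrix (spiral_order_v2 matrix)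

-- ===== LEMMAS AND PROOFS =====

-- unfolding equations for A's well-founded recursion
theorem spiralA_nil : spiral_order_v2 [] = [] := by
  rw [spiral_order_v2.eq_def]

theorem spiralA_cons (first : List Int) (rest : List (List Int)) :
    spiral_order_v2 (first :: rest) =
      first ++ rest.filterMap (fun r => r.getLast?)
      ++ (match (rest.map List.dropLast).getLast? with
          | some r => r.reverse
          | none => [])
      ++ (rest.map List.dropLast).dropLast.reverse.filterMap (fun r => r.head?)
      ++ spiral_order_v2 ((rest.map List.dropLast).dropLast.map List.tail) := by
  rw [spiral_order_v2.eq_def]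

-- r[:-1] of the reversed row is the reversed tail
theorem reverse_dropLast_reverse (r : List Int) :
    r.reverse.dropLast.reverse = r.tail := by
  cases r with
  | nil => simp
  | cons a t => simp

-- the right column of the 180°-rotated rows is the left column of the rows
theorem filterMap_getLast?_map_reverse (l : List (List Int)) :
    (l.map List.reverse).filterMap (fun r => r.getLast?) =
      l.filterMap (fun r => r.head?) := by
  induction l with
  | nil => rfl
  | cons r t iht => cases r <;> simp [iht]

-- rotating twice by 180° (with each rotation trimming r[:-1]) leaves the middle rows' tails
theorem rot_rot (l : List (List Int)) :
    ((l.reverse.map List.reverse).reverse).map (fun r => r.dropLast.reverse) =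
      l.map List.tail := by
  simp only [← List.map_reverse, List.reverse_reverse, List.map_map]
  exact List.map_congr_left (fun r _ => reverse_dropLast_reverse r)

-- the accumulator of B's loop only prefixes the result
theorem spiralAltGo_append (n : Nat) :
    ∀ (m : List (List Int)) (res : List Int), m.length ≤ n →
      spiralAltGo m res = res ++ spiralAltGo m [] := by
  induction n with
  | zero =>
      intro m res hm
      have : m = [] := List.length_eq_zero_iff.mp (Nat.le_zero.mp hm)
      subst this; simp [spiralAltGo]
  | succ n ih =>
      intro m res hm
      cases m with
      | nil => simp [spiralAltGo]
      | cons h rest =>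
          rw [spiralAltGo, spiralAltGo]
          rw [ih _ _ (by simpa using Nat.lt_succ_iff.mp (by simpa using hm)),
              ih (rest.reverse.map (fun r => r.dropLast.reverse))
                 (([] ++ h) ++ rest.filterMap (fun r => r.getLast?))
                 (by simpa using Nat.lt_succ_iff.mp (by simpa using hm))]
          simp

-- reversing a nonempty list of rows and each row: last row reversed, then the rest
theorem rot180_cons (l : List (List Int)) (hl : l ≠ []) :
    l.reverse.map List.reverse =
      (l.getLast hl).reverse :: (l.dropLast.reverse.map List.reverse) := by
  conv_lhs => rw [← List.dropLast_append_getLast hl]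
  simp

-- main equality: one four-phase step of A equals two half-turn steps of B's loop
theorem spiral_eq_bounded (n : Nat) :
    ∀ (m : List (List Int)), m.length ≤ n →
      spiral_order_v2 m = spiralAltGo m [] := by
  induction n with
  | zero =>
      intro m hm
      have : m = [] := List.length_eq_zero_iff.mp (Nat.le_zero.mp hm)
      subst this; rw [spiralA_nil]; simp [spiralAltGo]
  | succ n ih =>
      intro m hm
      cases m with
      | nil => rw [spiralA_nil]; simp [spiralAltGo]
      | cons first rest =>
          have hrest : rest.length ≤ n := by simpa using Nat.lt_succ_iff.mp (by simpa using hm)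
          rw [spiralA_cons, spiralAltGo]
          have hrot : rest.reverse.map (fun r => r.dropLast.reverse)
              = (rest.map List.dropLast).reverse.map List.reverse := by
            simp [List.map_map, Function.comp_def]
          rw [hrot]
          by_cases hm2 : rest.map List.dropLast = []
          · have : rest = [] := by simpa using hm2
            subst this
            simp [spiralAltGo, spiralA_nil]
          · rw [rot180_cons _ hm2, spiralAltGo]
            have hlen : rest.length ≠ 0 := by
              intro h0
              exact hm2 (by simpa using List.length_eq_zero_iff.mp (by simpa using h0))
            rw [spiralAltGo_append (n := n) _ _ (by
                  simp only [List.length_map, List.length_reverse, List.length_dropLast]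
                  omega)]
            rw [filterMap_getLast?_map_reverse ((rest.map List.dropLast).dropLast.reverse)]
            rw [rot_rot ((rest.map List.dropLast).dropLast)]
            rw [ih _ (by
                  simp only [List.length_map, List.length_dropLast]
                  omega)]
            rw [List.getLast?_eq_getLast_of_ne_nil hm2]
            simp

-- ===== VERDICT (by name: the statement is the Claim_ definition above) =====
theorem spiral_order_v2_spec : Claim_equal_spiral_order_v2 := by
  intro matrix _
  unfold Spec_spiral_order_v2 spiral_order_v2_alt
  exact spiral_eq_bounded matrix.length matrix le_rfl
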